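-- pv_equiv track=rewrite | github.com/kypello/Scummpiler | costume_decoder.py | get_limb_offset_data
-- ===== SOURCE A (Python) =====
-- def get_limb_offset_data(limb_datas, limb_data_start):
--     limb_offset_data = []
--     offset = limb_data_start
--
--     for limb_data in limb_datas:
--         limb_offset_data.append(offset & 0xFF)
--         limb_offset_data.append((offset & 0xFF00) >> 8)
--
--         offset += len(limb_data)
--
--     while len(limb_offset_data) < 32:
--         limb_offset_data.append(offset & 0xFF)
--         limb_offset_data.append((offset & 0xFF00) >> 8)
--
--     return limb_offset_data
-- ===== SOURCE B (Python) =====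
-- def get_limb_offset_data(limb_datas, limb_data_start):
--     # Build the table back-to-front: compute the final offset first, then walk
--     # the limbs in reverse, subtracting each length and prepending its byte pair.
--     off = limb_data_start + sum(len(d) for d in limb_datas)
--     out = [off & 0xFF, (off & 0xFF00) >> 8] * max(16 - len(limb_datas), 0)
--     for d in reversed(limb_datas):
--         off -= len(d)
--         out = [off & 0xFF, (off & 0xFF00) >> 8] + out
--     return out
-- ===== Notes on version B (the rewrite author's own statement) =====
-- stated objective: alternative
-- what changed: A accumulates the offset forward, emitting bytes as it goes and padding with a while loop on the byte count; B first computes the final offset as the total length, lays down the padding pairs, and then constructs the table back-to-front by walking the limbs in reverse, subtracting each length and prepending its byte pair.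
import Mathlib
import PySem

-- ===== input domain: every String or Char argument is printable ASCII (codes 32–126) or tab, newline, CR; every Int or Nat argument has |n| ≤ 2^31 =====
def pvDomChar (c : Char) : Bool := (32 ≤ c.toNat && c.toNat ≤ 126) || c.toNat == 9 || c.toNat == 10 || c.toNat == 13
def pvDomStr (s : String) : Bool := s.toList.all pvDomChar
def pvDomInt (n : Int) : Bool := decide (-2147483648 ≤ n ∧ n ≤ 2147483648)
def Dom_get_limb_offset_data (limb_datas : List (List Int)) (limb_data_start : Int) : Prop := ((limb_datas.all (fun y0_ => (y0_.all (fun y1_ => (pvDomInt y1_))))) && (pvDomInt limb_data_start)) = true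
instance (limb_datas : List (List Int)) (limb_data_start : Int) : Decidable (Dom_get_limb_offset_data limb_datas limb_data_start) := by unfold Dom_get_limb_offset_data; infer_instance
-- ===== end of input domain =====

-- B builds the table back-to-front: final offset first, then a reverse walk subtracting lengths and prepending pairs; same values as A.
-- ===== PORT A =====
-- for limb_data in limb_datas: append two bytes; advance offset
def pvALoop : List (List Int) → Int → List Int → List Int × Int
  | [], off, acc => (acc, off)
  | d :: rest, off, acc =>
      pvALoop rest (off + (d.length : Int))
        (acc ++ [PySem.Int.band off 255, (PySem.Int.band off 65280) >>> 8])

-- while len(limb_offset_data) < 32: append two bytes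
def pvAPad (acc : List Int) (off : Int) : List Int :=
  if acc.length < 32 then
    pvAPad (acc ++ [PySem.Int.band off 255, (PySem.Int.band off 65280) >>> 8]) off
  else acc
termination_by 32 - acc.length
decreasing_by simp; omega

def get_limb_offset_data (limb_datas : List (List Int)) (limb_data_start : Int) : List Int :=
  let (acc, off) := pvALoop limb_datas limb_data_start []
  pvAPad acc off

-- ===== PORT B =====
-- sum(len(d) for d in limb_datas)
def pvBSum (limb_datas : List (List Int)) : Int :=
  limb_datas.foldl (fun a d => a + (d.length : Int)) 0

-- for d in reversed(limb_datas): off -= len(d); out = pair(off) + out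
def pvBRev : List (List Int) → Int → List Int → Int × List Int
  | [], off, out => (off, out)
  | d :: rest, off, out =>
      pvBRev rest (off - (d.length : Int))
        ([PySem.Int.band (off - (d.length : Int)) 255,
          (PySem.Int.band (off - (d.length : Int)) 65280) >>> 8] ++ out)

def get_limb_offset_data_alt (limb_datas : List (List Int)) (limb_data_start : Int) : List Int :=
  let off := limb_data_start + pvBSum limb_datas
  -- [lo, hi] * max(16 - len(limb_datas), 0): Nat subtraction is exactly Python's max(·, 0)
  let out := (List.replicate (16 - limb_datas.length)
      [PySem.Int.band off 255, (PySem.Int.band off 65280) >>> 8]).flatten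
  (pvBRev limb_datas.reverse off out).2

-- ===== PRECONDITION & SPEC =====
def Spec_get_limb_offset_data (limb_datas : List (List Int)) (limb_data_start : Int) (out : List Int) : Prop := out = get_limb_offset_data_alt limb_datas limb_data_start
instance (limb_datas : List (List Int)) (limb_data_start : Int) (out : List Int) : Decidable (Spec_get_limb_offset_data limb_datas limb_data_start out) := by unfold Spec_get_limb_offset_data; infer_instance

-- ===== CLAIM =====
def Claim_equal_get_limb_offset_data : Prop := ∀ (limb_datas : List (List Int)) (limb_data_start : Int), Dom_get_limb_offset_data limb_datas limb_data_start → Spec_get_limb_offset_data limb_datas limb_data_start (get_limb_offset_data limb_datas limb_data_start)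

-- ===== LEMMAS AND PROOFS =====
def pvPair (o : Int) : List Int := [PySem.Int.band o 255, (PySem.Int.band o 65280) >>> 8]

-- the prefix-offset table both sides realise
def pvOffs : List (List Int) → Int → List Int
  | [], _ => []
  | d :: rest, off => off :: pvOffs rest (off + (d.length : Int))

def pvSumN (ld : List (List Int)) : Int := (ld.map (fun d => (d.length : Int))).sum

lemma pvBSum_aux (ld : List (List Int)) : ∀ a : Int,
    ld.foldl (fun a d => a + (d.length : Int)) a = a + pvSumN ld := by
  induction ld with
  | nil => intro a; simp [pvSumN]
  | cons d rest ih => intro a; simp [pvSumN, ih]; ring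

lemma pvBSum_eq (ld : List (List Int)) : pvBSum ld = pvSumN ld := by
  unfold pvBSum; rw [pvBSum_aux]; ring

lemma pvALoop_eq (ld : List (List Int)) : ∀ (off : Int) (acc : List Int),
    pvALoop ld off acc = (acc ++ (pvOffs ld off).flatMap pvPair, off + pvSumN ld) := by
  induction ld with
  | nil => intro off acc; simp [pvALoop, pvOffs, pvSumN]
  | cons d rest ih =>
      intro off acc
      simp [pvALoop, pvOffs, pvSumN, ih, pvPair]
      ring

lemma pvOffs_len (ld : List (List Int)) : ∀ off : Int, (pvOffs ld off).length = ld.length := by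
  induction ld with
  | nil => intro off; simp [pvOffs]
  | cons d rest ih => intro off; simp [pvOffs, ih]

lemma flatMap_pvPair_len (l : List Int) : (l.flatMap pvPair).length = 2 * l.length := by
  induction l with
  | nil => simp
  | cons o rest ih => simp [pvPair, ih]; omega

lemma pvAPad_eq (acc : List Int) (off : Int) :
    pvAPad acc off = acc ++ (List.replicate ((32 - acc.length + 1) / 2) off).flatMap pvPair := by
  rw [pvAPad]
  split_ifs with h
  · rw [pvAPad_eq]
    have h2 : (32 - acc.length + 1) / 2 = (32 - (acc.length + 2) + 1) / 2 + 1 := by omega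
    rw [h2, List.replicate_succ, List.flatMap_cons]
    simp [pvPair]
  · have h0 : (32 - acc.length + 1) / 2 = 0 := by omega
    simp [h0]
termination_by 32 - acc.length
decreasing_by simp; omega

lemma pvBRev_eq (ld : List (List Int)) : ∀ (s : Int) (out : List Int),
    pvBRev ld.reverse (s + pvSumN ld) out = (s, (pvOffs ld s).flatMap pvPair ++ out) := by
  induction ld with
  | nil => intro s out; simp [pvBRev, pvOffs, pvSumN]
  | cons d rest ih =>
      intro s out
      have hrev : (d :: rest).reverse = rest.reverse ++ [d] := by simp
      have hsum : s + pvSumN (d :: rest) = (s + (d.length : Int)) + pvSumN rest := by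
        simp [pvSumN]; ring
      rw [hrev, hsum]
      -- pvBRev over an append processes the first part, then the second
      have happ : ∀ (xs ys : List (List Int)) (o : Int) (out : List Int),
          pvBRev (xs ++ ys) o out =
            pvBRev ys (pvBRev xs o out).1 (pvBRev xs o out).2 := by
        intro xs
        induction xs with
        | nil => intro ys o out; simp [pvBRev]
        | cons x xt ihx => intro ys o out; simp [pvBRev, ihx]
      rw [happ, ih (s + (d.length : Int)) out]
      simp [pvBRev, pvOffs, pvPair]

lemma flatten_replicate_pvPair (k : Nat) (o : Int) :
    (List.replicate k (pvPair o)).flatten = (List.replicate k o).flatMap pvPair := by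
  induction k with
  | zero => simp
  | succ n ih => simp [List.replicate_succ, ih]

-- ===== VERDICT =====
theorem get_limb_offset_data_spec : Claim_equal_get_limb_offset_data := by
  intro ld s _
  unfold Spec_get_limb_offset_data get_limb_offset_data get_limb_offset_data_alt
  rw [pvALoop_eq]
  simp only [List.nil_append]
  rw [pvAPad_eq, pvBSum_eq]
  have hfl := flatMap_pvPair_len (pvOffs ld s)
  have hol := pvOffs_len ld s
  have hrep : (32 - ((pvOffs ld s).flatMap pvPair).length + 1) / 2 = 16 - ld.length := by omega
  rw [hrep]
  have := pvBRev_eq ld s ((List.replicate (16 - ld.length)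
      [PySem.Int.band (s + pvSumN ld) 255, (PySem.Int.band (s + pvSumN ld) 65280) >>> 8]).flatten)
  simp only [this]
  rw [← flatten_replicate_pvPair (o := s + pvSumN ld)]
  rfl
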